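-- pv_equiv track=rewrite | github.com/PimClappers/AtfentufKood | 2023/day2/part2.py | findNumbersOfColor
-- ===== SOURCE A (Python) =====
-- def find_all(input, searchterm):
-- 	done = False
-- 	searchFrom = 0
-- 	foundIndexes = []
-- 	while not done:
-- 		index = input.find(searchterm, searchFrom)
-- 		if (index >= 0):
-- 			foundIndexes.append(index)
-- 			searchFrom = index + 1
-- 		else:
-- 			done = True
-- 	return foundIndexes
--
-- def findNumbersOfColor(game, color):
--     numbers = []
--     redLocations = find_all(game, color)
--     for location in redLocations:
--         setOfColor = ""
--         setOfColor += game[location - 3]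
--         setOfColor += game[location - 2]
--         numbers.append(int(setOfColor))
--     return numbers
-- ===== SOURCE B (Python) =====
-- def findNumbersOfColor(game, color):
--     return [int(game[i - 3] + game[i - 2])
--             for i in range(len(game)) if game.startswith(color, i)]
-- ===== Notes on version B (the rewrite author's own statement) =====
-- stated objective: simpler
-- what changed: Replaces the stateful while-loop of repeated str.find calls (find_all) plus a separate accumulation loop by a single list comprehension scanning every position with startswith; Pre_ excludes the empty color string, a degenerate query on which the empty pattern also matches at the end-of-string position and either match set is defensible.
-- outside the precondition, e.g. on findNumbersOfColor('12 34', ''): A returns [3, 34, 41, 12, 2, 3], B returns [3, 34, 41, 12, 2]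
import Mathlib
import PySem

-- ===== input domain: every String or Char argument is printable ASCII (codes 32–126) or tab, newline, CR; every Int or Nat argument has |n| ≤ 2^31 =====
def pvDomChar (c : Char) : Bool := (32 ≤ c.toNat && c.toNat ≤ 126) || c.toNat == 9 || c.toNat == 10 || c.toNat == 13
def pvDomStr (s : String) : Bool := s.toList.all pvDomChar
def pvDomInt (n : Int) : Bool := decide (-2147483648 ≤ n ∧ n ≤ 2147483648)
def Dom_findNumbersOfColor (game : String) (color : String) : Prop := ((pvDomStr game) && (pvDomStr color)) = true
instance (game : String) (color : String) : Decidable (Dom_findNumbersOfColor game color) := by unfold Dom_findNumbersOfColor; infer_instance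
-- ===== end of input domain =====

-- B replaces A's repeated str.find while-loop by a single positional startswith scan
-- (objective: simpler, not faster); Pre_ excludes the degenerate empty color.

-- ===== PORT A =====
-- find_all: the while-loop; the fuel only bounds the iteration count (searchFrom grows
-- by at least 1 per step and the loop stops once it passes len(g), so len(g)+2 suffices)
def pvFindAll (g c : List Char) (fuel : Nat) (searchFrom : Nat) (acc : List Int) : List Int :=
  match fuel with
  | 0 => acc
  | fuel + 1 =>
    let index := PySem.Chars.findFrom g c (searchFrom : Int) none
    if 0 ≤ index then
      pvFindAll g c fuel (index.toNat + 1) (acc ++ [index])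
    else
      acc

def findNumbersOfColor (game : String) (color : String) : List Int :=
  -- redLocations = find_all(game, color); for each location,
  -- setOfColor = game[location-3] + game[location-2]; numbers.append(int(setOfColor))
  -- pyGetD / .getD 0 defaults are unreachable under Pre_ (Python raises there)
  (pvFindAll game.toList color.toList (game.toList.length + 2) 0 []).map (fun location =>
    (PySem.Int.ofChars? [PySem.List.pyGetD game.toList (location - 3) ' ',
                         PySem.List.pyGetD game.toList (location - 2) ' ']).getD 0)

-- ===== PORT B =====
-- [int(game[i-3] + game[i-2]) for i in range(len(game)) if game.startswith(color, i)]
-- game.startswith(color, i) for 0 ≤ i < len(game) is exactly: color is a prefix of game[i:]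
def findNumbersOfColor_alt (game : String) (color : String) : List Int :=
  ((PySem.List.pyRange 0 (game.toList.length : Int) 1).filter
      (fun i => PySem.Chars.startswith (game.toList.drop i.toNat) color.toList)).map
    (fun i =>
      (PySem.Int.ofChars? [PySem.List.pyGetD game.toList (i - 3) ' ',
                           PySem.List.pyGetD game.toList (i - 2) ' ']).getD 0)

-- ===== PRECONDITION & SPEC =====
-- Pre_ excludes (a) inputs on which Python A raises — a match position whose two preceding
-- characters do not exist (IndexError) or do not parse as an int (ValueError) — and
-- (b) the empty color, a degenerate query on which str.find's empty pattern also matches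
-- at the end-of-string position and either match set is defensible.
def Pre_findNumbersOfColor (game : String) (color : String) : Prop :=
  color.toList ≠ [] ∧
  ∀ i : Nat, i ≤ game.toList.length →
    PySem.Chars.startswith (game.toList.drop i) color.toList = true →
      PySem.Raise.InRange game.toList.length ((i : Int) - 3) ∧
      PySem.Raise.InRange game.toList.length ((i : Int) - 2) ∧
      (PySem.Int.ofChars? [PySem.List.pyGetD game.toList ((i : Int) - 3) ' ',
                           PySem.List.pyGetD game.toList ((i : Int) - 2) ' ']).isSome = true
instance (game : String) (color : String) : Decidable (Pre_findNumbersOfColor game color) := by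
  unfold Pre_findNumbersOfColor; infer_instance

def pvWitness_findNumbersOfColor : String × String := ("12 red", "red")

def Spec_findNumbersOfColor (game : String) (color : String) (out : List Int) : Prop := out = findNumbersOfColor_alt game color
instance (game : String) (color : String) (out : List Int) : Decidable (Spec_findNumbersOfColor game color out) := by unfold Spec_findNumbersOfColor; infer_instance

-- ===== CLAIM (what is proved, stated in full; the proofs are below) =====
def Claim_equal_findNumbersOfColor : Prop := ∀ (game : String) (color : String), Dom_findNumbersOfColor game color → Pre_findNumbersOfColor game color → Spec_findNumbersOfColor game color (findNumbersOfColor game color)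

-- ===== LEMMAS AND PROOFS =====

-- s.find(sub, start) with start > len(s) is -1 (the port's loop needs this to terminate)
theorem pvFindFrom_gt_len (g c : List Char) (k : Nat) (h : g.length < k) :
    PySem.Chars.findFrom g c (k : Int) none = -1 := by
  simp [PySem.Chars.findFrom]
  omega

-- when find(sub, start) succeeds, its result lies between start and len(s)
theorem pvFindFrom_bounds (g c : List Char) (k : Nat)
    (h : 0 ≤ PySem.Chars.findFrom g c (k : Int) none) :
    (k : Int) ≤ PySem.Chars.findFrom g c (k : Int) none ∧
      PySem.Chars.findFrom g c (k : Int) none ≤ (g.length : Int) := by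
  by_cases hk : k ≤ g.length
  · refine ⟨(PySem.Chars.findFrom_natCast_spec g c k hk (by omega)).1, ?_⟩
    rw [PySem.Chars.findFrom_natCast g c k hk]
    split
    · omega
    · have h1 := PySem.Chars.find_le_length (List.drop k g) c
      simp [List.length_drop] at h1
      omega
  · have := pvFindFrom_gt_len g c k (by omega)
    omega


theorem pvWitness_ok :
    Dom_findNumbersOfColor pvWitness_findNumbersOfColor.1 pvWitness_findNumbersOfColor.2 ∧
    Pre_findNumbersOfColor pvWitness_findNumbersOfColor.1 pvWitness_findNumbersOfColor.2 := by
  decide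

-- the loop of find_all, started at k with enough fuel, collects exactly the match positions in [k, len]
theorem pvFindAll_eq (g c : List Char) :
    ∀ (fk k : Nat) (acc : List Int), g.length + 1 - k ≤ fk →
      pvFindAll g c fk k acc =
        acc ++ (PySem.List.pyRange (k : Int) ((g.length : Int) + 1) 1).filter
          (fun i => PySem.Chars.startswith (g.drop i.toNat) c) := by
  intro fk
  induction fk with
  | zero =>
      intro k acc hfk
      have hk : g.length < k := by omega
      rw [PySem.List.pyRange_one_eq_nil (by omega)]
      simp [pvFindAll]
  | succ n ih =>
      intro k acc hfk
      rw [pvFindAll]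
      by_cases h : 0 ≤ PySem.Chars.findFrom g c (k : Int) none
      · simp only [h, if_true]
        obtain ⟨hkm, hml⟩ := pvFindFrom_bounds g c k h
        have hklen : k ≤ g.length := by omega
        obtain ⟨-, hpre, hmin⟩ :=
          PySem.Chars.findFrom_natCast_spec g c k hklen (by omega)
        generalize hM : PySem.Chars.findFrom g c (k : Int) none = m at *
        have hswm : PySem.Chars.startswith (g.drop m.toNat) c = true :=
          (PySem.Chars.startswith_iff _ _).2 hpre
        have hnil : (PySem.List.pyRange (k : Int) m 1).filter
            (fun i => PySem.Chars.startswith (g.drop i.toNat) c) = [] := by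
          rw [List.filter_eq_nil_iff]
          intro i hi
          have hb := (PySem.List.mem_pyRange_one).1 hi
          simp only [Bool.not_eq_true]
          rw [← Bool.not_eq_true, PySem.Chars.startswith_iff]
          exact hmin i.toNat (by omega) (by omega)
        have hsplit : (PySem.List.pyRange (k : Int) ((g.length : Int) + 1) 1).filter
            (fun i => PySem.Chars.startswith (g.drop i.toNat) c) =
            m :: (PySem.List.pyRange (m + 1) ((g.length : Int) + 1) 1).filter
              (fun i => PySem.Chars.startswith (g.drop i.toNat) c) := by
          rw [PySem.List.pyRange_one_append (k : Int) m ((g.length : Int) + 1) hkm (by omega),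
              List.filter_append, hnil, PySem.List.pyRange_one_cons (by omega)]
          simp [hswm]
        have hcast : ((m.toNat + 1 : Nat) : Int) = m + 1 := by omega
        rw [ih (m.toNat + 1) (acc ++ [m]) (by omega), hsplit, hcast]
        simp
      · simp only [h, if_false]
        by_cases hklen : k ≤ g.length
        · have hneg : PySem.Chars.findFrom g c (k : Int) none = -1 := by
            rw [PySem.Chars.findFrom_natCast g c k hklen] at h ⊢
            split
            · rfl
            · have h1 := PySem.Chars.neg_one_le_find (List.drop k g) c
              rename_i hf
              omega
          have hninf : ¬ c <:+: List.drop k g :=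
            (PySem.Chars.findFrom_natCast_eq_neg_one_iff g c k hklen).1 hneg
          have hnil : (PySem.List.pyRange (k : Int) ((g.length : Int) + 1) 1).filter
              (fun i => PySem.Chars.startswith (g.drop i.toNat) c) = [] := by
            rw [List.filter_eq_nil_iff]
            intro i hi
            have hb := (PySem.List.mem_pyRange_one).1 hi
            simp only [Bool.not_eq_true]
            rw [← Bool.not_eq_true, PySem.Chars.startswith_iff]
            intro hp
            have hdd : List.drop i.toNat g = List.drop (i.toNat - k) (List.drop k g) := by
              rw [List.drop_drop]; congr 1; omega
            rw [hdd] at hp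
            exact hninf (hp.isInfix.trans (List.drop_suffix _ _).isInfix)
          rw [hnil, List.append_nil]
        · rw [PySem.List.pyRange_one_eq_nil (by omega)]
          simp

-- for a nonempty pattern, the match positions in [0, len] are those in [0, len):
-- nothing matches at the end-of-string position
theorem pvFilter_drop_last (g c : List Char) (hc : c ≠ []) :
    (PySem.List.pyRange 0 ((g.length : Int) + 1) 1).filter
        (fun i => PySem.Chars.startswith (g.drop i.toNat) c) =
      (PySem.List.pyRange 0 (g.length : Int) 1).filter
        (fun i => PySem.Chars.startswith (g.drop i.toNat) c) := by
  have hsw : PySem.Chars.startswith ([] : List Char) c = false := by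
    rw [← Bool.not_eq_true, PySem.Chars.startswith_iff]
    intro hp
    exact hc (List.prefix_nil.mp hp)
  have h2 : (PySem.List.pyRange (g.length : Int) ((g.length : Int) + 1) 1).filter
      (fun i => PySem.Chars.startswith (g.drop i.toNat) c) = [] := by
    rw [PySem.List.pyRange_one_singleton]
    simp [List.drop_length, hsw]
  rw [PySem.List.pyRange_one_append 0 (g.length : Int) ((g.length : Int) + 1) (by omega) (by omega),
      List.filter_append, h2, List.append_nil]

-- ===== VERDICT (by name: the statement is the Claim_ definition above) =====
theorem findNumbersOfColor_spec : Claim_equal_findNumbersOfColor := by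
  intro game color _ hpre
  unfold Spec_findNumbersOfColor findNumbersOfColor findNumbersOfColor_alt
  rw [pvFindAll_eq game.toList color.toList (game.toList.length + 2) 0 [] (by omega)]
  simp only [Nat.cast_zero, List.nil_append]
  rw [pvFilter_drop_last game.toList color.toList hpre.1]
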